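-- pv_equiv track=rewrite | github.com/iskesss/conure | main.py | truncate_https
-- ===== SOURCE A (Python) =====
-- def truncate_https(link: str) -> str:
--     output = ""
--     counter = 0
--     char_index = 0
--     while char_index < len(link) and counter < 2:
--         if link[char_index] == "/":
--             counter += 1
--         char_index += 1
--
--     while char_index < len(link):
--         output += link[char_index]
--         char_index += 1
--
--     return output
-- ===== SOURCE B (Python) =====
-- def truncate_https(link: str) -> str:
--     parts = link.split("/", 2)
--     return parts[2] if len(parts) == 3 else ""
-- ===== Notes on version B (the rewrite author's own statement) =====
-- stated objective: simpler
-- what changed: Replaces the two manual character-by-character while loops (count two slashes, then copy the tail by repeated string concatenation) with a single maxsplit-2 split and an indexed pick of the last segment.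
import Mathlib
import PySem

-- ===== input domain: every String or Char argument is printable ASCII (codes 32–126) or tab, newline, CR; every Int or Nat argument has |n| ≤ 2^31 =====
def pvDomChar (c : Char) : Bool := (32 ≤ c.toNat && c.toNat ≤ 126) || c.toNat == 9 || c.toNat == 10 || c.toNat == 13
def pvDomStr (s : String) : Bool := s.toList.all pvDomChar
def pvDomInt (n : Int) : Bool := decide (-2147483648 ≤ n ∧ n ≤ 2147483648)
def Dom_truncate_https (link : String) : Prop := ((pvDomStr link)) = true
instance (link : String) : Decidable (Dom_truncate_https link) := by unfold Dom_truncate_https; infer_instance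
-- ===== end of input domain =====

-- B replaces A's two manual character loops with split("/", 2) and an indexed pick (objective: simpler).

-- ===== PORT A =====
-- first while loop: advance char_index until two '/' have been passed (counter < 2)
def truncA : List Char → Nat → List Char
  | [], _ => []
  | c :: rest, counter =>
    if counter < 2 then truncA rest (if c = '/' then counter + 1 else counter)
    else c :: rest

def truncate_https (link : String) : String :=
  -- second while loop: append the remaining characters to output one by one
  String.ofList ((truncA link.toList 0).foldl (fun out c => out ++ [c]) [])

-- ===== PORT B =====
def truncate_https_alt (link : String) : String :=
  match PySem.Str.splitMax? link "/" 2 with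
  | some parts => if parts.length = 3 then parts.getD 2 "" else ""
  | none => ""

-- ===== PRECONDITION & SPEC =====
def Spec_truncate_https (link : String) (out : String) : Prop := out = truncate_https_alt link
instance (link : String) (out : String) : Decidable (Spec_truncate_https link out) := by unfold Spec_truncate_https; infer_instance

-- ===== CLAIM (what is proved, stated in full; the proofs are below) =====
def Claim_equal_truncate_https : Prop := ∀ (link : String), Dom_truncate_https link → Spec_truncate_https link (truncate_https link)

-- ===== LEMMAS AND PROOFS =====

-- proof-side reference function: drop everything up to and including the m-th '/' ([] if fewer)
def pvSkip : List Char → Nat → List Char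
  | l, 0 => l
  | [], _ + 1 => []
  | c :: rest, m + 1 => pvSkip rest (if c = '/' then m else m + 1)

-- proof-side structural version of splitOnMax for the single-char separator '/'
def pvSp : List Char → Nat → List (List Char)
  | l, 0 => [l]
  | [], _ + 1 => [[]]
  | c :: rest, m + 1 =>
    if c = '/' then [] :: pvSp rest m
    else
      match pvSp rest (m + 1) with
      | [] => [[c]]
      | p :: ps => (c :: p) :: ps

theorem pvSp_ne_nil (l : List Char) (m : Nat) : pvSp l m ≠ [] := by
  induction l generalizing m with
  | nil => cases m <;> simp [pvSp]
  | cons c rest ih =>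
    cases m with
    | zero => simp [pvSp]
    | succ m =>
      by_cases hc : c = '/'
      · simp [pvSp, hc]
      · simp only [pvSp, if_neg hc]
        rcases h : pvSp rest (m + 1) with _ | ⟨p, ps⟩ <;> simp

theorem truncA_eq_pvSkip (l : List Char) (counter : Nat) (h : counter ≤ 2) :
    truncA l counter = pvSkip l (2 - counter) := by
  induction l generalizing counter with
  | nil => rcases counter with _ | _ | _ | _ <;> simp_all [truncA, pvSkip]
  | cons c rest ih =>
    rcases counter with _ | _ | _ | counter
    · by_cases hc : c = '/'
      · simp only [truncA, hc, if_pos rfl, if_pos (by omega : (0:Nat) < 2), pvSkip]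
        simpa using ih 1 (by omega)
      · simp only [truncA, if_neg hc, if_pos (by omega : (0:Nat) < 2), pvSkip]
        simpa using ih 0 (by omega)
    · by_cases hc : c = '/'
      · simp only [truncA, hc, if_pos rfl, if_pos (by omega : (1:Nat) < 2), pvSkip]
        simpa using ih 2 (by omega)
      · simp only [truncA, if_neg hc, if_pos (by omega : (1:Nat) < 2), pvSkip]
        simpa using ih 1 (by omega)
    · simp [truncA, pvSkip]
    · omega

theorem foldl_append_id (l acc : List Char) :
    l.foldl (fun out c => out ++ [c]) acc = acc ++ l := by
  induction l generalizing acc with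
  | nil => simp
  | cons c rest ih => simp [List.foldl, ih]

theorem go_eq_pvSp (fuel : Nat) : ∀ (l : List Char) (m : Nat) (cur : List Char)
    (acc : List (List Char)), l.length ≤ fuel →
    PySem.Chars.splitOnMax.go ['/'] fuel m l cur acc
      = acc.reverse ++ (pvSp l m).modifyHead (cur.reverse ++ ·) := by
  induction fuel with
  | zero =>
    intro l m cur acc h
    have hl : l = [] := by cases l <;> simp_all
    subst hl
    cases m <;> simp [PySem.Chars.splitOnMax.go, pvSp]
  | succ fuel ih =>
    intro l m cur acc h
    cases l with
    | nil => cases m <;> simp [PySem.Chars.splitOnMax.go, pvSp]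
    | cons c rest =>
      cases m with
      | zero => simp [PySem.Chars.splitOnMax.go, pvSp]
      | succ m =>
        by_cases hc : c = '/'
        · subst hc
          rw [show PySem.Chars.splitOnMax.go ['/'] (fuel + 1) (m + 1) ('/' :: rest) cur acc
                = PySem.Chars.splitOnMax.go ['/'] fuel m rest [] (cur.reverse :: acc) by
              simp [PySem.Chars.splitOnMax.go, List.isPrefixOf]]
          rw [ih rest m [] (cur.reverse :: acc) (by simpa using Nat.le_of_succ_le_succ h)]
          rcases hsp : pvSp rest m with _ | ⟨p, ps⟩
          · exact absurd hsp (pvSp_ne_nil rest m)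
          · simp [pvSp, hsp]
        · have hpre : List.isPrefixOf ['/'] (c :: rest) = false := by
            simp [List.isPrefixOf, Ne.symm hc]
          rw [show PySem.Chars.splitOnMax.go ['/'] (fuel + 1) (m + 1) (c :: rest) cur acc
                = PySem.Chars.splitOnMax.go ['/'] fuel (m + 1) rest (c :: cur) acc by
              simp [PySem.Chars.splitOnMax.go, hpre]]
          rw [ih rest (m + 1) (c :: cur) acc (by simpa using Nat.le_of_succ_le_succ h)]
          rcases hsp : pvSp rest (m + 1) with _ | ⟨p, ps⟩
          · exact absurd hsp (pvSp_ne_nil rest (m + 1))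
          · simp [pvSp, if_neg hc, hsp]

theorem pvSp_spec (l : List Char) : ∀ (m : Nat),
    ((pvSp l m).length = m + 1 ∧ (pvSp l m).getLast? = some (pvSkip l m)) ∨
    ((pvSp l m).length < m + 1 ∧ pvSkip l m = []) := by
  induction l with
  | nil =>
    intro m
    cases m with
    | zero => left; simp [pvSp, pvSkip]
    | succ m => right; exact ⟨by simp [pvSp], by simp [pvSkip]⟩
  | cons c rest ih =>
    intro m
    cases m with
    | zero => left; simp [pvSp, pvSkip]
    | succ m =>
      by_cases hc : c = '/'
      · have := ih m
        rcases hsp : pvSp rest m with _ | ⟨p, ps⟩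
        · exact absurd hsp (pvSp_ne_nil rest m)
        · rw [hsp] at this
          simp only [pvSp, pvSkip, hc, if_pos rfl]
          rcases this with ⟨h1, h2⟩ | ⟨h1, h2⟩
          · left
            constructor
            · simp [hsp, ← h1]
            · simp [hsp] at h2 ⊢
              simpa [List.getLast?_cons_cons] using h2
          · right
            constructor
            · simp [hsp] at h1 ⊢; omega
            · exact h2
      · have := ih (m + 1)
        rcases hsp : pvSp rest (m + 1) with _ | ⟨p, ps⟩
        · exact absurd hsp (pvSp_ne_nil rest (m + 1))
        · rw [hsp] at this
          simp only [pvSp, pvSkip, if_neg hc, hsp]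
          rcases this with ⟨h1, h2⟩ | ⟨h1, h2⟩
          · left
            have hps : ps ≠ [] := by
              intro hnil; subst hnil; simp at h1
            rcases ps with _ | ⟨q, qs⟩
            · exact absurd rfl hps
            constructor
            · simpa using h1
            · rw [List.getLast?_cons_cons] at h2 ⊢
              exact h2
          · right
            constructor
            · simpa using h1
            · exact h2

theorem splitMax_eval (link : String) :
    PySem.Str.splitMax? link "/" 2 = some ((pvSp link.toList 2).map String.ofList) := by
  have h1 : PySem.Chars.splitMax? link.toList ['/'] 2 = some (pvSp link.toList 2) := by
    rw [PySem.Chars.splitMax?, PySem.Chars.splitOnMax]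
    norm_num
    rw [show ((2:Int).toNat) = 2 from rfl,
        go_eq_pvSp (link.length + 1) link.toList 2 [] []
          (by simpa using Nat.le_succ link.length)]
    rcases hsp : pvSp link.toList 2 with _ | ⟨p, ps⟩
    · exact absurd hsp (pvSp_ne_nil _ _)
    · simp
  rw [PySem.Str.splitMax?, show ("/" : String).toList = ['/'] from rfl, h1]
  rfl

theorem truncate_https_main (link : String) :
    truncate_https link = truncate_https_alt link := by
  unfold truncate_https truncate_https_alt
  rw [foldl_append_id, List.nil_append,
      truncA_eq_pvSkip link.toList 0 (by omega), splitMax_eval]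
  simp only [List.length_map]
  rcases pvSp_spec link.toList 2 with ⟨h1, h2⟩ | ⟨h1, h2⟩
  · obtain ⟨a, b, c, habc⟩ := List.length_eq_three.mp h1
    rw [habc] at h2 ⊢
    simp at h2
    simp [h2]
  · rw [h2]
    have hlen : (pvSp link.toList 2).length ≠ 3 := by omega
    simp [hlen]

theorem truncate_https_spec : Claim_equal_truncate_https := by
  intro link _
  unfold Spec_truncate_https
  exact truncate_https_main link
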